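-- pv_equiv track=rewrite | github.com/mandalbiswadip/ContextualGeneration | scripts/util.py | next_sentence_start_index_from_span
-- ===== SOURCE A (Python) =====
-- def next_sentence_start_index_from_span(paragraph:str, char_start:int):
--     """
--     get next sentence starting index based on span start index
--     """
--     i = 0
--
--     for line in paragraph.splitlines():
--         end = i + len(line)
--         if i <= char_start <= end:
--             return end + 1
--         i = end + 1
--     return i
-- ===== SOURCE B (Python) =====
-- def next_sentence_start_index_from_span(paragraph: str, char_start: int):
--     """
--     get next sentence starting index based on span start index
--     """
--     # Precompute the exclusive end offset of every line, then binary-search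
--     # the contiguous intervals instead of scanning them linearly.
--     ends = []
--     e = 0
--     for line in paragraph.splitlines():
--         e += len(line)
--         ends.append(e)
--         e += 1
--     if not ends:
--         return 0
--     total = ends[-1] + 1
--     if char_start < 0 or char_start > ends[-1]:
--         return total
--     lo, hi = 0, len(ends) - 1
--     while lo < hi:
--         mid = (lo + hi) // 2
--         if ends[mid] < char_start:
--             lo = mid + 1
--         else:
--             hi = mid
--     return ends[lo] + 1
-- ===== Notes on version B (the rewrite author's own statement) =====
-- stated objective: alternative
-- what changed: B precomputes the exclusive end offset of every line into an array and locates the containing interval with a binary search over those contiguous boundaries (with explicit guards for empty input and out-of-range/negative offsets), instead of A's single linear scan carrying a running start offset.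
import Mathlib
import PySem

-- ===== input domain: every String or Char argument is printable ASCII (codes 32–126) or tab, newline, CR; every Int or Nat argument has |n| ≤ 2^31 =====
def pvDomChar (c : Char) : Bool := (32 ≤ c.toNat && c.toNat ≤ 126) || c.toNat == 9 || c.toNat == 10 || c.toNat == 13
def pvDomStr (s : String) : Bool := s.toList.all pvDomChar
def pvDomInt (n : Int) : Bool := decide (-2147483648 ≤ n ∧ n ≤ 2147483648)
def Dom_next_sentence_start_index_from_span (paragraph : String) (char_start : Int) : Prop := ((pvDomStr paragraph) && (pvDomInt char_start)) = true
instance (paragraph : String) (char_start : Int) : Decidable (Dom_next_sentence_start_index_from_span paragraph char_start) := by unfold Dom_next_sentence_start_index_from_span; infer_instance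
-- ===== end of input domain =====

-- B replaces A's linear scan with a precomputed array of line end offsets and a
-- binary search over the contiguous intervals (alternative decomposition).

-- ===== PORT A =====
-- the for-loop of A, carrying the running offset i
def pvALoop (char_start : Int) : List String → Int → Int
  | [], i => i
  | line :: rest, i =>
    let e := i + PySem.Str.len line
    if i ≤ char_start ∧ char_start ≤ e then e + 1
    else pvALoop char_start rest (e + 1)

def next_sentence_start_index_from_span (paragraph : String) (char_start : Int) : Int :=
  pvALoop char_start (PySem.Str.splitlines paragraph) 0

-- ===== PORT B =====
-- B's first loop: collect the exclusive end offset of every line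
def pvEnds : List String → Int → List Int
  | [], _ => []
  | line :: rest, e =>
    let e' := e + PySem.Str.len line
    e' :: pvEnds rest (e' + 1)

-- B's while-loop: binary search; ends[mid] is always in range, so it is List.getD
def pvBSearch (ends : List Int) (char_start : Int) (lo hi : Nat) : Nat :=
  if _h : lo < hi then
    let mid := (lo + hi) / 2
    if ends.getD mid 0 < char_start then pvBSearch ends char_start (mid + 1) hi
    else pvBSearch ends char_start lo mid
  else lo
termination_by hi - lo
decreasing_by all_goals omega

def next_sentence_start_index_from_span_alt (paragraph : String) (char_start : Int) : Int :=
  let ends := pvEnds (PySem.Str.splitlines paragraph) 0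
  match ends.getLast? with
  | none => 0
  | some last =>
    let total := last + 1
    if char_start < 0 ∨ last < char_start then total
    else (ends.getD (pvBSearch ends char_start 0 (ends.length - 1)) 0) + 1

-- ===== PRECONDITION & SPEC =====
def Spec_next_sentence_start_index_from_span (paragraph : String) (char_start : Int) (out : Int) : Prop := out = next_sentence_start_index_from_span_alt paragraph char_start
instance (paragraph : String) (char_start : Int) (out : Int) : Decidable (Spec_next_sentence_start_index_from_span paragraph char_start out) := by unfold Spec_next_sentence_start_index_from_span; infer_instance

-- ===== CLAIM (what is proved, stated in full; the proofs are below) =====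
def Claim_equal_next_sentence_start_index_from_span : Prop := ∀ (paragraph : String) (char_start : Int), Dom_next_sentence_start_index_from_span paragraph char_start → Spec_next_sentence_start_index_from_span paragraph char_start (next_sentence_start_index_from_span paragraph char_start)

-- ===== LEMMAS AND PROOFS =====

theorem pv_len_nonneg (s : String) : 0 ≤ PySem.Str.len s := by
  simp [PySem.Str.len_eq]

-- total offset after processing all lines starting from i
def pvTotal (lines : List String) (i : Int) : Int :=
  i + ((lines.map PySem.Str.len).sum + lines.length)

theorem pvTotal_cons (l : String) (rest : List String) (i : Int) :
    pvTotal (l :: rest) i = pvTotal rest (i + PySem.Str.len l + 1) := by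
  simp [pvTotal]; ring

theorem pvEnds_length (lines : List String) (i : Int) :
    (pvEnds lines i).length = lines.length := by
  induction lines generalizing i with
  | nil => simp [pvEnds]
  | cons l rest ih => simp [pvEnds, ih]

theorem pvEnds_getLast (lines : List String) (i : Int) (h : lines ≠ []) :
    (pvEnds lines i).getLast? = some (pvTotal lines i - 1) := by
  induction lines generalizing i with
  | nil => simp at h
  | cons l rest ih =>
    cases rest with
    | nil => simp [pvEnds, pvTotal]; ring
    | cons l2 r2 =>
      have h2 : pvEnds (l2 :: r2) (i + PySem.Str.len l + 1) ≠ [] := by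
        intro hc
        have := pvEnds_length (l2 :: r2) (i + PySem.Str.len l + 1)
        rw [hc] at this; simp at this
      have hih := ih (i + PySem.Str.len l + 1) (by simp)
      simp only [pvEnds] at hih ⊢
      rw [List.getLast?_cons_cons, hih]
      simp only [pvTotal, List.map_cons, List.sum_cons, List.length_cons]
      congr 1
      push_cast
      ring

-- every element of pvEnds lines i is ≥ i
theorem pvEnds_ge (lines : List String) (i : Int) :
    ∀ x ∈ pvEnds lines i, i ≤ x := by
  induction lines generalizing i with
  | nil => simp [pvEnds]
  | cons l rest ih =>
    intro x hx
    simp only [pvEnds, List.mem_cons] at hx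
    rcases hx with h | h
    · have := pv_len_nonneg l; omega
    · have := ih (i + PySem.Str.len l + 1) x h
      have := pv_len_nonneg l; omega

-- the ends list is strictly increasing
theorem pvEnds_sorted (lines : List String) (i : Int) :
    (pvEnds lines i).Pairwise (· < ·) := by
  induction lines generalizing i with
  | nil => simp [pvEnds]
  | cons l rest ih =>
    simp only [pvEnds]
    refine List.pairwise_cons.mpr ⟨?_, ih _⟩
    intro x hx
    have := pvEnds_ge rest (i + PySem.Str.len l + 1) x hx
    omega

-- monotone indexing on a strictly increasing list
theorem pvSorted_getD_mono (l : List Int) (hs : l.Pairwise (· < ·))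
    (a b : Nat) (hab : a ≤ b) (hb : b < l.length) : l.getD a 0 ≤ l.getD b 0 := by
  rcases Nat.eq_or_lt_of_le hab with h | h
  · subst h; exact le_refl _
  · rw [List.getD_eq_getElem l 0 (by omega), List.getD_eq_getElem l 0 hb]
    exact le_of_lt (List.pairwise_iff_getElem.mp hs a b (by omega) hb h)

-- characterization of A's loop via find? on the ends list
theorem pvALoop_char (char_start : Int) (lines : List String) (i : Int) :
    pvALoop char_start lines i =
      if char_start < i then pvTotal lines i
      else match (pvEnds lines i).find? (fun e => char_start ≤ e) with
        | some e => e + 1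
        | none => pvTotal lines i := by
  induction lines generalizing i with
  | nil => simp [pvALoop, pvEnds, pvTotal]
  | cons l rest ih =>
    have hlen := pv_len_nonneg l
    simp only [pvALoop, pvEnds]
    by_cases h1 : i ≤ char_start ∧ char_start ≤ i + PySem.Str.len l
    · rw [if_pos h1, if_neg (by omega),
        List.find?_cons_of_pos (by simp only [decide_eq_true_eq]; omega)]
    · rw [if_neg h1, ih]
      by_cases h2 : char_start < i
      · rw [if_pos (by omega), if_pos h2, pvTotal_cons]
      · have h3 : ¬ char_start ≤ i + PySem.Str.len l := fun hc => h1 ⟨by omega, hc⟩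
        rw [if_neg (by omega), if_neg h2,
          List.find?_cons_of_neg (by simp only [Bool.not_eq_true, decide_eq_false_iff_not]; omega), pvTotal_cons]

-- binary search returns the least index in [lo,hi] whose end is ≥ char_start
theorem pvBSearch_spec (ends : List Int) (c : Int) (hs : ends.Pairwise (· < ·)) :
    ∀ (n lo hi : Nat), hi - lo ≤ n → lo ≤ hi → hi < ends.length →
      c ≤ ends.getD hi 0 →
      lo ≤ pvBSearch ends c lo hi ∧ pvBSearch ends c lo hi ≤ hi ∧
        c ≤ ends.getD (pvBSearch ends c lo hi) 0 ∧
        ∀ j, lo ≤ j → j < pvBSearch ends c lo hi → ends.getD j 0 < c := by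
  intro n
  induction n with
  | zero =>
    intro lo hi h0 hle hlen hc
    have heq : lo = hi := by omega
    subst heq
    rw [pvBSearch]
    simp only [dif_neg (by omega : ¬ lo < lo)]
    exact ⟨le_refl _, le_refl _, hc, fun j h1 h2 => by omega⟩
  | succ n ih =>
    intro lo hi h0 hle hlen hc
    by_cases hlt : lo < hi
    case neg =>
      have heq : lo = hi := by omega
      subst heq
      rw [pvBSearch]
      simp only [dif_neg (by omega : ¬ lo < lo)]
      exact ⟨le_refl _, le_refl _, hc, fun j h1 h2 => by omega⟩
    case pos =>
    rw [pvBSearch]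
    rw [dif_pos hlt]
    simp only
    have hm1 : lo ≤ (lo + hi) / 2 := by omega
    have hm2 : (lo + hi) / 2 < hi := by omega
    by_cases hcmp : ends.getD ((lo + hi) / 2) 0 < c
    · rw [if_pos hcmp]
      obtain ⟨r1, r2, r3, r4⟩ := ih ((lo + hi) / 2 + 1) hi (by omega) (by omega) hlen hc
      refine ⟨by omega, r2, r3, ?_⟩
      intro j hj1 hj2
      by_cases hj : j ≤ (lo + hi) / 2
      · have := pvSorted_getD_mono ends hs j ((lo + hi) / 2) hj (by omega)
        omega
      · exact r4 j (by omega) hj2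
    · rw [if_neg hcmp]
      obtain ⟨r1, r2, r3, r4⟩ := ih lo ((lo + hi) / 2) (by omega) (by omega) (by omega) (by omega)
      exact ⟨r1, by omega, r3, r4⟩

-- find? hits the first index whose predicate holds
theorem pvFind?_first (l : List Int) (p : Int → Bool) :
    ∀ (r : Nat), r < l.length → (∀ j, j < r → p (l.getD j 0) = false) →
      p (l.getD r 0) = true → l.find? p = some (l.getD r 0) := by
  induction l with
  | nil => intro r hr; simp at hr
  | cons a t ih =>
    intro r hr hbefore hr_p
    cases r with
    | zero => exact List.find?_cons_of_pos (by simpa using hr_p)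
    | succ r' =>
      have h0 : p a = false := by simpa using hbefore 0 (by omega)
      rw [List.find?_cons_of_neg (by simp [h0])]
      have : (a :: t).getD (r' + 1) 0 = t.getD r' 0 := by simp
      rw [this] at hr_p ⊢
      exact ih r' (by simpa using hr) (fun j hj => by simpa using hbefore (j + 1) (by omega)) hr_p

-- every member of a strictly increasing list is ≤ its last element
theorem pvMem_le_getLast (l : List Int) (hs : l.Pairwise (· < ·)) (last : Int)
    (h : l.getLast? = some last) : ∀ x ∈ l, x ≤ last := by
  intro x hx
  obtain ⟨k, hk, hxk⟩ := List.mem_iff_getElem.mp hx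
  have hne : l ≠ [] := by intro hc; rw [hc] at h; simp at h
  have hlast : last = l.getD (l.length - 1) 0 := by
    rw [List.getLast?_eq_getElem?] at h
    rw [List.getD_eq_getElem l 0 (by cases l with | nil => simp at hne | cons a t => simp)]
    have := h
    rw [List.getElem?_eq_getElem (by cases l with | nil => simp at hne | cons a t => simp)] at this
    simpa using this.symm
  have := pvSorted_getD_mono l hs k (l.length - 1) (by omega)
    (by cases l with | nil => simp at hne | cons a t => simp)
  rw [List.getD_eq_getElem l 0 hk, hxk] at this
  omega

-- main equivalence on the ends list
theorem pvMain (lines : List String) (c : Int) :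
    pvALoop c lines 0 =
      (match (pvEnds lines 0).getLast? with
       | none => 0
       | some last =>
         if c < 0 ∨ last < c then last + 1
         else ((pvEnds lines 0).getD
             (pvBSearch (pvEnds lines 0) c 0 ((pvEnds lines 0).length - 1)) 0) + 1) := by
  cases hL : (pvEnds lines 0).getLast? with
  | none =>
    have hnil : pvEnds lines 0 = [] := by
      cases he : pvEnds lines 0 with
      | nil => rfl
      | cons a t => rw [he] at hL; simp at hL
    have : lines = [] := by
      have := pvEnds_length lines 0
      rw [hnil] at this
      exact List.eq_nil_of_length_eq_zero this.symm
    subst this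
    simp [pvALoop]
  | some last =>
    have hne : lines ≠ [] := by
      intro hc; subst hc; simp [pvEnds] at hL
    have hlast : last = pvTotal lines 0 - 1 := by
      rw [pvEnds_getLast lines 0 hne] at hL
      simpa using hL.symm
    have hlen0 : 0 < (pvEnds lines 0).length := by
      rw [pvEnds_length]
      cases lines with | nil => simp at hne | cons a t => simp
    have hsorted := pvEnds_sorted lines 0
    rw [pvALoop_char]
    show (if c < 0 then pvTotal lines 0
        else match (pvEnds lines 0).find? (fun e => c ≤ e) with
          | some e => e + 1
          | none => pvTotal lines 0) =
      (if c < 0 ∨ last < c then last + 1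
        else ((pvEnds lines 0).getD
          (pvBSearch (pvEnds lines 0) c 0 ((pvEnds lines 0).length - 1)) 0) + 1)
    by_cases hc0 : c < 0
    · rw [if_pos hc0, if_pos (Or.inl hc0)]
      omega
    · rw [if_neg hc0]
      by_cases hbig : last < c
      · -- c is past the last end: find? is none, both return total
        have hnone : (pvEnds lines 0).find? (fun e => c ≤ e) = none := by
          rw [List.find?_eq_none]
          intro x hx
          have := pvMem_le_getLast _ hsorted last hL x hx
          simp; omega
        rw [hnone, if_pos (Or.inr hbig)]
        show pvTotal lines 0 = last + 1
        omega
      · -- 0 ≤ c ≤ last: binary search finds the first end ≥ c, as does find?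
        rw [if_neg (by omega : ¬ (c < 0 ∨ last < c))]
        have hlastD : (pvEnds lines 0).getD ((pvEnds lines 0).length - 1) 0 = last := by
          rw [List.getD_eq_getElem _ 0 (by omega)]
          rw [List.getLast?_eq_getElem?, List.getElem?_eq_getElem (by omega)] at hL
          simpa using hL
        obtain ⟨r1, r2, r3, r4⟩ := pvBSearch_spec (pvEnds lines 0) c hsorted
          ((pvEnds lines 0).length - 1) 0 ((pvEnds lines 0).length - 1)
          (le_refl _) (by omega) (by omega) (by rw [hlastD]; omega)
        rw [pvFind?_first (pvEnds lines 0) _ (pvBSearch (pvEnds lines 0) c 0 ((pvEnds lines 0).length - 1))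
          (by omega)
          (fun j hj => by
            have := r4 j (by omega) hj
            simp only [decide_eq_false_iff_not]; omega)
          (by simp only [decide_eq_true_eq]; omega)]

-- ===== VERDICT (by name: the statement is the Claim_ definition above) =====
theorem next_sentence_start_index_from_span_spec : Claim_equal_next_sentence_start_index_from_span := by
  intro paragraph char_start _
  unfold Spec_next_sentence_start_index_from_span
  unfold next_sentence_start_index_from_span next_sentence_start_index_from_span_alt
  exact pvMain (PySem.Str.splitlines paragraph) char_start
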